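-- pv_equiv track=rewrite | github.com/brystmar/biffers | app/main/routes.py | to_choices_list
-- ===== SOURCE A (Python) =====
-- def to_choices_list(data) -> list:
--     """Return a sorted list of key/value tuples that identifies each BIF."""
--     sorted_list = []
--     other_bifs = []
--     for d in data:
--         # Keep the SSF BIFs at the top
--         if 'ssf' in d['name'].lower():
--             sorted_list.append((d['name'], d['name']))
--         else:
--             other_bifs.append((d['name'], d['name']))
--
--     sorted_list.sort()
--     other_bifs.sort()
--
--     for o in other_bifs:
--         sorted_list.append(o)
--
--     return sorted_list
-- ===== SOURCE B (Python) =====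
-- def to_choices_list(data) -> list:
--     """Return a sorted list of key/value tuples that identifies each BIF."""
--     ordered = sorted(data, key=lambda d: (0 if 'ssf' in d['name'].lower() else 1, d['name']))
--     return [(d['name'], d['name']) for d in ordered]
-- ===== Notes on version B (the rewrite author's own statement) =====
-- stated objective: idiomatic
-- what changed: One stable sort of the whole list with a composite key (ssf-priority, name) plus a comprehension replaces the two-bucket partition, two separate sorts and the append loop.
import Mathlib
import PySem

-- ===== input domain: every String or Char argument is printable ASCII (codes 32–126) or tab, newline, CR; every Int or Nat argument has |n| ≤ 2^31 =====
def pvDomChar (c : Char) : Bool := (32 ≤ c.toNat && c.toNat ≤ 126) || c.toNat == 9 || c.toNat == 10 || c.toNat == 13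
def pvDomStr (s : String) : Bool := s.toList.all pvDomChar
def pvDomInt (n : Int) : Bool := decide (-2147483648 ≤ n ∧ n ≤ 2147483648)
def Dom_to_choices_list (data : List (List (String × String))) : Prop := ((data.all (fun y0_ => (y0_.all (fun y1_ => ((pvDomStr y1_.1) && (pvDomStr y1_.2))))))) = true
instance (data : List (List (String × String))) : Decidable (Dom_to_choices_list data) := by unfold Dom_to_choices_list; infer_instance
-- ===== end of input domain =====

-- B replaces A's two-bucket partition + two sorts + append loop by one stable sort
-- with a composite key (ssf-priority, name) followed by a map; equivalence of the
-- RETURN value is proved (neither version mutates its argument).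

-- ===== PORT A =====
-- d['name'] is the first-match association-list lookup; under Pre_ the key is
-- present, so the `.getD ""` default is never used (Python raises KeyError there).
def to_choices_list (data : List (List (String × String))) : List (String × String) :=
  let acc := data.foldl
    (fun (acc : List (String × String) × List (String × String)) d =>
      if PySem.Str.isIn "ssf" (PySem.Str.lower ((d.lookup "name").getD "")) then
        (acc.1 ++ [((d.lookup "name").getD "", (d.lookup "name").getD "")], acc.2)
      else
        (acc.1, acc.2 ++ [((d.lookup "name").getD "", (d.lookup "name").getD "")]))
    ([], [])
  let sorted_list := PySem.List.sorted2 acc.1 (fun t => t.1) (fun t => t.2) false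
  let other_bifs := PySem.List.sorted2 acc.2 (fun t => t.1) (fun t => t.2) false
  other_bifs.foldl (fun acc o => acc ++ [o]) sorted_list

-- ===== PORT B =====
def to_choices_list_alt (data : List (List (String × String))) : List (String × String) :=
  let ordered := PySem.List.sorted2 data
    (fun d => if PySem.Str.isIn "ssf" (PySem.Str.lower ((d.lookup "name").getD "")) then (0 : Int) else 1)
    (fun d => (d.lookup "name").getD "") false
  ordered.map (fun d => ((d.lookup "name").getD "", (d.lookup "name").getD ""))

-- ===== PRECONDITION & SPEC =====
-- Pre_ excludes exactly the inputs where some dict lacks the key 'name': there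
-- Python's d['name'] raises KeyError (in both A and B).
def Pre_to_choices_list (data : List (List (String × String))) : Prop :=
  ∀ d ∈ data, (d.lookup "name").isSome
instance (data : List (List (String × String))) : Decidable (Pre_to_choices_list data) := by unfold Pre_to_choices_list; infer_instance

def pvWitness_to_choices_list : (List (List (String × String))) :=
  [[("name", "SSF one")], [("name", "alpha")], [("name", "beta"), ("id", "7")]]

def Spec_to_choices_list (data : List (List (String × String))) (out : List (String × String)) : Prop := out = to_choices_list_alt data
instance (data : List (List (String × String))) (out : List (String × String)) : Decidable (Spec_to_choices_list data out) := by unfold Spec_to_choices_list; infer_instance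

-- ===== CLAIM (what is proved, stated in full; the proofs are below) =====
def Claim_equal_to_choices_list : Prop := ∀ (data : List (List (String × String))), Dom_to_choices_list data → Pre_to_choices_list data → Spec_to_choices_list data (to_choices_list data)

-- ===== LEMMAS AND PROOFS =====

-- inserting past a block whose every element x must precede
theorem insertBy_append_all_before {α : Type} (b : α → α → Bool) (x : α) (A B : List α)
    (h : ∀ y ∈ B, b x y = true) :
    PySem.List.insertBy b x (A ++ B) = PySem.List.insertBy b x A ++ B := by
  induction A with
  | nil =>
    cases B with
    | nil => rfl
    | cons c cs => simp [PySem.List.insertBy, h c (by simp)]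
  | cons a A ih =>
    by_cases hb : b x a = true <;> simp [PySem.List.insertBy, hb, ih]

-- inserting into the second block when x precedes nothing in the first
theorem insertBy_append_all_after {α : Type} (b : α → α → Bool) (x : α) (A B : List α)
    (h : ∀ y ∈ A, b x y = false) :
    PySem.List.insertBy b x (A ++ B) = A ++ PySem.List.insertBy b x B := by
  induction A with
  | nil => rfl
  | cons a A ih =>
    simp only [List.cons_append, PySem.List.insertBy, h a (by simp)]
    simp only [Bool.false_eq_true, if_false, List.cons.injEq, true_and]
    exact ih (fun y hy => h y (by simp [hy]))

-- the comparison may be replaced pointwise on the target list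
theorem insertBy_congr {α : Type} (b b' : α → α → Bool) (x : α) (m : List α)
    (h : ∀ y ∈ m, b x y = b' x y) :
    PySem.List.insertBy b x m = PySem.List.insertBy b' x m := by
  induction m with
  | nil => rfl
  | cons a m ih =>
    simp only [PySem.List.insertBy, h a (by simp)]
    rw [ih (fun y hy => h y (by simp [hy]))]

-- insertBy commutes with a map when the comparisons agree through the map
theorem insertBy_map {α β : Type} (f : α → β) (b : β → β → Bool) (b' : α → α → Bool)
    (x : α) (m : List α) (h : ∀ y, b (f x) (f y) = b' x y) :
    PySem.List.insertBy b (f x) (m.map f) = (PySem.List.insertBy b' x m).map f := by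
  induction m with
  | nil => rfl
  | cons a m ih =>
    by_cases hb : b' x a = true <;>
      simp [PySem.List.insertBy, h a, hb, ih]

-- sorting duplicated pairs (f a, f a) by the tuple key is sorting by f, mapped
theorem foldl_insert_pair {α : Type} (f : α → String) (l m : List α) :
    (l.map (fun a => (f a, f a))).foldl
      (fun acc x => PySem.List.insertBy
        (fun s t => decide (s.1 < t.1) || (!decide (t.1 < s.1) && decide (s.2 < t.2))) x acc)
      (m.map (fun a => (f a, f a)))
    = (l.foldl (fun acc a => PySem.List.insertBy (fun s t => decide (f s < f t)) a acc) m).map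
        (fun a => (f a, f a)) := by
  induction l generalizing m with
  | nil => rfl
  | cons a l ih =>
    simp only [List.map_cons, List.foldl_cons]
    rw [insertBy_map (fun a => (f a, f a))
          (fun s t => decide (s.1 < t.1) || (!decide (t.1 < s.1) && decide (s.2 < t.2)))
          (fun s t => decide (f s < f t)) a m
          (by intro y; by_cases h1 : f a < f y <;> by_cases h2 : f y < f a <;> simp [h1, h2])]
    exact ih (PySem.List.insertBy (fun s t => decide (f s < f t)) a m)

theorem sorted2_map_pair {α : Type} (f : α → String) (l : List α) :
    PySem.List.sorted2 (l.map (fun a => (f a, f a))) (fun t => t.1) (fun t => t.2) false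
    = (PySem.List.sorted l f false).map (fun a => (f a, f a)) := by
  simp only [PySem.List.sorted2, PySem.List.sorted, Bool.false_eq_true, if_false]
  exact foldl_insert_pair f l []

-- one stable sort by (0/1 priority, key) is: sort the 0-group, then the 1-group
theorem sorted2_split {α : Type} (p : α → Bool) (key : α → String) (xs : List α) :
    PySem.List.sorted2 xs (fun x => if p x then (0 : Int) else 1) key false
    = PySem.List.sorted (xs.filter p) key false
      ++ PySem.List.sorted (xs.filter (fun x => !p x)) key false := by
  induction xs using List.reverseRecOn with
  | nil => rfl
  | append_singleton xs x ih =>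
    simp only [PySem.List.sorted2, PySem.List.sorted, Bool.false_eq_true, if_false,
      List.foldl_append, List.foldl_cons, List.foldl_nil, List.filter_append,
      List.filter_cons, List.filter_nil] at ih ⊢
    rw [ih]
    by_cases hp : p x = true
    · simp only [hp, Bool.not_true, Bool.false_eq_true, if_false, if_true]
      rw [insertBy_append_all_before _ x _ _ (by
        intro y hy
        have hy' : y ∈ xs.filter (fun x => !p x) :=
          (PySem.List.mem_sorted (xs.filter (fun x => !p x)) key false y).mp (by
            simpa [PySem.List.sorted, Bool.false_eq_true] using hy)
        have hpy : p y = false := by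
          have := List.of_mem_filter hy'; simpa using this
        simp [hp, hpy])]
      simp only [List.foldl_cons, List.foldl_nil]
      congr 1
      apply insertBy_congr
      intro y hy
      have hy' : y ∈ xs.filter p :=
        (PySem.List.mem_sorted (xs.filter p) key false y).mp (by
          simpa [PySem.List.sorted, Bool.false_eq_true] using hy)
      have hpy : p y = true := List.of_mem_filter hy'
      simp [hp, hpy]
    · have hp' : p x = false := by simpa using hp
      simp only [hp', Bool.not_false, Bool.false_eq_true, if_false, if_true]
      rw [insertBy_append_all_after _ x _ _ (by
        intro y hy
        have hy' : y ∈ xs.filter p :=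
          (PySem.List.mem_sorted (xs.filter p) key false y).mp (by
            simpa [PySem.List.sorted, Bool.false_eq_true] using hy)
        have hpy : p y = true := List.of_mem_filter hy'
        simp [hp', hpy])]
      simp only [List.foldl_cons, List.foldl_nil]
      congr 1
      apply insertBy_congr
      intro y hy
      have hy' : y ∈ xs.filter (fun x => !p x) :=
        (PySem.List.mem_sorted (xs.filter (fun x => !p x)) key false y).mp (by
          simpa [PySem.List.sorted, Bool.false_eq_true] using hy)
      have hpy : p y = false := by
        have := List.of_mem_filter hy'; simpa using this
      simp [hp', hpy]

-- A's partition loop over a pair of accumulators is (filter p, filter !p) mapped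
theorem foldl_partition {α β : Type} (p : α → Bool) (f : α → β) (l : List α)
    (l1 l2 : List β) :
    l.foldl (fun acc x => if p x then (acc.1 ++ [f x], acc.2) else (acc.1, acc.2 ++ [f x]))
        (l1, l2)
    = (l1 ++ (l.filter p).map f, l2 ++ (l.filter (fun x => !p x)).map f) := by
  induction l generalizing l1 l2 with
  | nil => simp
  | cons a l ih =>
    by_cases hp : p a = true <;>
      simp [hp, ih]

-- ===== VERDICT (by name: the statement is the Claim_ definition above) =====
theorem to_choices_list_spec : Claim_equal_to_choices_list := by
  intro data _ _
  unfold Spec_to_choices_list to_choices_list to_choices_list_alt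
  rw [foldl_partition
    (fun d => PySem.Str.isIn "ssf" (PySem.Str.lower ((d.lookup "name").getD "")))
    (fun d => ((d.lookup "name").getD "", (d.lookup "name").getD "")) data [] []]
  simp only [List.nil_append]
  rw [PySem.List.foldl_append_singleton_eq_self]
  rw [sorted2_map_pair, sorted2_map_pair, sorted2_split]
  simp [List.map_append]
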